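-- pv_equiv track=rewrite | github.com/qyuan2/TAGAPT_generated_samples | Find_hub_process_test.py | find_special_start_node
-- ===== SOURCE A (Python) =====
-- def one_out_edges_smaller_than_all_in_edges(out_edge,in_edge):
--     if len(out_edge)*len(in_edge) != 0:
--         result = any(x < min(in_edge) for x in out_edge)
--         return result
--     else:
--         return False
--
-- def find_special_start_node(adj_timestamp,entity_list):
--     special_node = []
--     for node1 in range(len(entity_list)):
--         out_edge = []
--         in_edge = []
--         for node2 in range(len(entity_list)):
--             if adj_timestamp[node1][node2] != 0:
--                 out_edge.append(adj_timestamp[node1][node2])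
--             if adj_timestamp[node2][node1] != 0:
--                 in_edge.append(adj_timestamp[node2][node1])
--         all_less = one_out_edges_smaller_than_all_in_edges(out_edge, in_edge)
--         if all_less:
--             if (len(out_edge) * len(in_edge) != 0):
--                 special_node.append(node1)
--     return special_node
-- ===== SOURCE B (Python) =====
-- def _min_nonzero(vals):
--     m = None
--     for v in vals:
--         if v != 0 and (m is None or v < m):
--             m = v
--     return m
--
-- def find_special_start_node(adj_timestamp, entity_list):
--     n = len(entity_list)
--     row_min = [_min_nonzero([adj_timestamp[i][j] for j in range(n)]) for i in range(n)]
--     col_min = [_min_nonzero([adj_timestamp[i][j] for i in range(n)]) for j in range(n)]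
--     return [i for i in range(n)
--             if row_min[i] is not None and col_min[i] is not None and row_min[i] < col_min[i]]
-- ===== Notes on version B (the rewrite author's own statement) =====
-- stated objective: simpler
-- what changed: B replaces A's per-node edge-list building plus the any/min helper by two min-tables (row_min/col_min = minimum nonzero entry of each row/column) built first, then a plain comparison sweep row_min[i] < col_min[i].
import Mathlib
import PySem

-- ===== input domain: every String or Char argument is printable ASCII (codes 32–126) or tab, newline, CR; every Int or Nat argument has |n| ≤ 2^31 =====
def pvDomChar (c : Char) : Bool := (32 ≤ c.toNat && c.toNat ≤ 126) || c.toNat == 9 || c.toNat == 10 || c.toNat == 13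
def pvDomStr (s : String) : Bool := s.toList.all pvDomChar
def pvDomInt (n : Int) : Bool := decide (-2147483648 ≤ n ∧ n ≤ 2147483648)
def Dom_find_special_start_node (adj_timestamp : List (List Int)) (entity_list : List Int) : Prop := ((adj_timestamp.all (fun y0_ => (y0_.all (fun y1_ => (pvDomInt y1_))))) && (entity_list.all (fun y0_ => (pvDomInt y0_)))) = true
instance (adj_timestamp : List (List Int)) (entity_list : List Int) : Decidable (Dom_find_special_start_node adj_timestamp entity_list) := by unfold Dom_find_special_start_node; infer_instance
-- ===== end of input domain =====

-- B builds per-row/per-column minimum-nonzero tables first and then filters indices by one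
-- comparison, instead of A's per-node edge-list construction with the any/min helper (objective: simpler).

-- ===== PORT A =====
def one_out_edges_smaller_than_all_in_edges (out_edge in_edge : List Int) : Bool :=
  if out_edge.length * in_edge.length ≠ 0 then
    out_edge.any (fun x => decide (x < (PySem.List.min? in_edge (fun y => y)).getD 0))
  else false

def find_special_start_node (adj_timestamp : List (List Int)) (entity_list : List Int) : List Int :=
  (PySem.List.pyRange 0 entity_list.length 1).foldl (fun special_node node1 =>
    let p := (PySem.List.pyRange 0 entity_list.length 1).foldl (fun (oi : List Int × List Int) node2 =>
      (if PySem.List.pyGetD (PySem.List.pyGetD adj_timestamp node1 []) node2 0 ≠ 0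
         then oi.1 ++ [PySem.List.pyGetD (PySem.List.pyGetD adj_timestamp node1 []) node2 0] else oi.1,
       if PySem.List.pyGetD (PySem.List.pyGetD adj_timestamp node2 []) node1 0 ≠ 0
         then oi.2 ++ [PySem.List.pyGetD (PySem.List.pyGetD adj_timestamp node2 []) node1 0] else oi.2))
      ([], [])
    let all_less := one_out_edges_smaller_than_all_in_edges p.1 p.2
    if all_less then
      (if p.1.length * p.2.length ≠ 0 then special_node ++ [node1] else special_node)
    else special_node) []

-- ===== PORT B =====
-- helper _min_nonzero of Source B: running minimum over the nonzero values, None when there is none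
def minNonzero (vals : List Int) : Option Int :=
  vals.foldl (fun m v =>
    match m with
    | none => if v ≠ 0 then some v else none
    | some x => if v ≠ 0 ∧ v < x then some v else some x) none

def find_special_start_node_alt (adj_timestamp : List (List Int)) (entity_list : List Int) : List Int :=
  let n : Int := entity_list.length
  let row_min := (PySem.List.pyRange 0 n 1).map (fun i =>
    minNonzero ((PySem.List.pyRange 0 n 1).map (fun j =>
      PySem.List.pyGetD (PySem.List.pyGetD adj_timestamp i []) j 0)))
  let col_min := (PySem.List.pyRange 0 n 1).map (fun j =>
    minNonzero ((PySem.List.pyRange 0 n 1).map (fun i =>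
      PySem.List.pyGetD (PySem.List.pyGetD adj_timestamp i []) j 0)))
  (PySem.List.pyRange 0 n 1).filter (fun i =>
    match PySem.List.pyGetD row_min i none, PySem.List.pyGetD col_min i none with
    | some r, some c => decide (r < c)
    | _, _ => false)

-- ===== PRECONDITION & SPEC =====
-- Exactly where Python A returns: the first len(entity_list) rows of adj_timestamp exist and each
-- has at least len(entity_list) entries (otherwise A raises IndexError).
def Pre_find_special_start_node (adj_timestamp : List (List Int)) (entity_list : List Int) : Prop :=
  entity_list.length ≤ adj_timestamp.length ∧
  ∀ row ∈ adj_timestamp.take entity_list.length, entity_list.length ≤ row.length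
instance (adj_timestamp : List (List Int)) (entity_list : List Int) : Decidable (Pre_find_special_start_node adj_timestamp entity_list) := by unfold Pre_find_special_start_node; infer_instance

def pvWitness_find_special_start_node : List (List Int) × List Int := ([[1, 2], [0, 3]], [10, 20])

def Spec_find_special_start_node (adj_timestamp : List (List Int)) (entity_list : List Int) (out : List Int) : Prop := out = find_special_start_node_alt adj_timestamp entity_list
instance (adj_timestamp : List (List Int)) (entity_list : List Int) (out : List Int) : Decidable (Spec_find_special_start_node adj_timestamp entity_list out) := by unfold Spec_find_special_start_node; infer_instance

-- ===== CLAIM (what is proved, stated in full; the proofs are below) =====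
def Claim_equal_find_special_start_node : Prop := ∀ (adj_timestamp : List (List Int)) (entity_list : List Int), Dom_find_special_start_node adj_timestamp entity_list → Pre_find_special_start_node adj_timestamp entity_list → Spec_find_special_start_node adj_timestamp entity_list (find_special_start_node adj_timestamp entity_list)

-- ===== LEMMAS AND PROOFS =====
-- (the two ports agree on ALL inputs: both read every matrix entry through the same
--  total pyGetD guard, so the Pre_ hypothesis is not needed by the proof)

-- the matrix entry adj[i][j] as both ports read it, and the value lists of row/column i
def pvVal (adj : List (List Int)) (i j : Int) : Int :=
  PySem.List.pyGetD (PySem.List.pyGetD adj i []) j 0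
def pvRowL (adj : List (List Int)) (n i : Int) : List Int :=
  (PySem.List.pyRange 0 n 1).map (fun j => pvVal adj i j)
def pvColL (adj : List (List Int)) (n i : Int) : List Int :=
  (PySem.List.pyRange 0 n 1).map (fun j => pvVal adj j i)
-- the common per-node condition both ports compute
def pvCond (adj : List (List Int)) (n i : Int) : Bool :=
  match minNonzero (pvRowL adj n i), minNonzero (pvColL adj n i) with
  | some r, some c => decide (r < c)
  | _, _ => false

lemma mnz_step_some (x v : Int) :
    (match (some x : Option Int) with
      | none => if v ≠ 0 then some v else none
      | some x => if v ≠ 0 ∧ v < x then some v else some x)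
    = some (if v ≠ 0 then min x v else x) := by
  by_cases hv : v = 0
  · simp [hv]
  · by_cases hlt : v < x
    · show (if v ≠ 0 ∧ v < x then some v else some x) = _
      rw [if_pos ⟨hv, hlt⟩, if_pos hv, min_eq_right (le_of_lt hlt)]
    · show (if v ≠ 0 ∧ v < x then some v else some x) = _
      rw [if_neg (by tauto), if_pos hv, min_eq_left (by omega)]

lemma minNonzero_go (L : List Int) : ∀ (x : Int),
    L.foldl (fun m v =>
      match m with
      | none => if v ≠ 0 then some v else none
      | some x => if v ≠ 0 ∧ v < x then some v else some x) (some x)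
    = some ((L.filter (fun v => v ≠ 0)).foldl min x) := by
  induction L with
  | nil => intro x; rfl
  | cons v t ih =>
    intro x
    rw [List.foldl_cons, mnz_step_some]
    by_cases hv : v = 0
    · rw [if_neg (by omega), ih, List.filter_cons_of_neg (by simp [hv])]
    · rw [if_pos hv, ih, List.filter_cons_of_pos (by simp [hv]), List.foldl_cons]

-- _min_nonzero computes the minimum of the nonzero values (none when there is none)
lemma minNonzero_eq (L : List Int) :
    minNonzero L = match L.filter (fun v => v ≠ 0) with
      | [] => none
      | x :: t => some (t.foldl min x) := by
  unfold minNonzero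
  induction L with
  | nil => rfl
  | cons v t ih =>
    rw [List.foldl_cons]
    show List.foldl _ (if v ≠ 0 then some v else none) t = _
    by_cases hv : v = 0
    · rw [if_neg (by omega), List.filter_cons_of_neg (by simp [hv])]
      exact ih
    · rw [if_pos hv, List.filter_cons_of_pos (by simp [hv]), minNonzero_go]

-- A's per-node test on the filtered edge lists equals B's min-table comparison
lemma cond_eq (L1 L2 : List Int) :
    ((one_out_edges_smaller_than_all_in_edges (L1.filter (fun v => v ≠ 0)) (L2.filter (fun v => v ≠ 0)) &&
      decide ((L1.filter (fun v => v ≠ 0)).length * (L2.filter (fun v => v ≠ 0)).length ≠ 0)) =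
     (match minNonzero L1, minNonzero L2 with
      | some r, some c => decide (r < c)
      | _, _ => false)) := by
  rw [minNonzero_eq, minNonzero_eq]
  rcases h1 : L1.filter (fun v => v ≠ 0) with _ | ⟨a, t1⟩ <;> rw [h1] <;>
    [skip; rcases h2 : L2.filter (fun v => v ≠ 0) with _ | ⟨b, t2⟩] <;> try rw [h2]
  · simp [one_out_edges_smaller_than_all_in_edges]
  · simp [one_out_edges_smaller_than_all_in_edges]
  · show (one_out_edges_smaller_than_all_in_edges (a :: t1) (b :: t2) && _) = decide (t1.foldl min a < t2.foldl min b)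
    unfold one_out_edges_smaller_than_all_in_edges
    rw [if_pos (by simp), PySem.List.min?_id_cons, Option.getD_some]
    have hlen : decide ((a :: t1).length * (b :: t2).length ≠ 0) = true := by simp
    rw [hlen, Bool.and_true]
    apply Bool.eq_iff_iff.mpr
    simp only [List.any_eq_true, decide_eq_true_eq]
    constructor
    · rintro ⟨x, hx, hlt⟩
      rcases List.mem_cons.mp hx with rfl | hx
      · exact lt_of_le_of_lt (PySem.List.foldl_min_le t1 x).1 hlt
      · exact lt_of_le_of_lt ((PySem.List.foldl_min_le t1 a).2 x hx) hlt
    · intro hlt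
      rcases PySem.List.foldl_min_mem t1 a with hm | hm
      · exact ⟨a, List.mem_cons_self, by rw [← hm]; exact hlt⟩
      · exact ⟨t1.foldl min a, List.mem_cons_of_mem _ hm, hlt⟩

-- A's inner loop builds exactly the filtered row/column value lists
lemma foldl_pair_append_if (adj : List (List Int)) (i : Int) (l : List Int) :
    ∀ (o0 i0 : List Int),
    l.foldl (fun (oi : List Int × List Int) j =>
      (if PySem.List.pyGetD (PySem.List.pyGetD adj i []) j 0 ≠ 0
         then oi.1 ++ [PySem.List.pyGetD (PySem.List.pyGetD adj i []) j 0] else oi.1,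
       if PySem.List.pyGetD (PySem.List.pyGetD adj j []) i 0 ≠ 0
         then oi.2 ++ [PySem.List.pyGetD (PySem.List.pyGetD adj j []) i 0] else oi.2)) (o0, i0)
    = (o0 ++ (l.map (fun j => pvVal adj i j)).filter (fun v => v ≠ 0),
       i0 ++ (l.map (fun j => pvVal adj j i)).filter (fun v => v ≠ 0)) := by
  induction l with
  | nil => intro o0 i0; simp
  | cons x t ih =>
    intro o0 i0
    rw [List.foldl_cons, ih]
    simp only [List.map_cons, List.filter_cons, pvVal]
    by_cases h1 : PySem.List.pyGetD (PySem.List.pyGetD adj i []) x 0 = 0 <;>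
      by_cases h2 : PySem.List.pyGetD (PySem.List.pyGetD adj x []) i 0 = 0 <;>
      simp [h1, h2]

lemma if_nested {α : Type} (b : Bool) (P : Prop) [Decidable P] (x y : α) :
    (if b then (if P then x else y) else y) = if (b && decide P) then x else y := by
  cases b <;> by_cases hP : P <;> simp [hP]

lemma cond_eq' (adj : List (List Int)) (n i : Int) :
    (one_out_edges_smaller_than_all_in_edges
        (((PySem.List.pyRange 0 n 1).map (fun j => pvVal adj i j)).filter (fun v => v ≠ 0))
        (((PySem.List.pyRange 0 n 1).map (fun j => pvVal adj j i)).filter (fun v => v ≠ 0)) &&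
      decide ((((PySem.List.pyRange 0 n 1).map (fun j => pvVal adj i j)).filter (fun v => v ≠ 0)).length *
        (((PySem.List.pyRange 0 n 1).map (fun j => pvVal adj j i)).filter (fun v => v ≠ 0)).length ≠ 0))
    = pvCond adj n i := by
  unfold pvCond pvRowL pvColL
  exact cond_eq _ _

lemma portA_eq (adj : List (List Int)) (el : List Int) :
    find_special_start_node adj el =
      (PySem.List.pyRange 0 el.length 1).filter (pvCond adj el.length) := by
  unfold find_special_start_node
  simp only [foldl_pair_append_if, List.nil_append]
  simp only [if_nested, cond_eq']
  rw [PySem.List.foldl_append_if]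
  simp

lemma portB_eq (adj : List (List Int)) (el : List Int) :
    find_special_start_node_alt adj el =
      (PySem.List.pyRange 0 el.length 1).filter (pvCond adj el.length) := by
  unfold find_special_start_node_alt
  apply List.filter_congr
  intro i hi
  have hmem := (PySem.List.mem_pyRange_one).mp hi
  rw [PySem.List.pyGetD_map_pyRange_of_nonneg _ _ _ _ hmem.1 hmem.2,
      PySem.List.pyGetD_map_pyRange_of_nonneg _ _ _ _ hmem.1 hmem.2]
  unfold pvCond pvRowL pvColL pvVal
  rfl

-- ===== VERDICT (by name: the statement is the Claim_ definition above) =====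
theorem find_special_start_node_spec : Claim_equal_find_special_start_node := by
  intro adj el _ _
  unfold Spec_find_special_start_node
  rw [portA_eq, portB_eq]
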